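-- pv_equiv track=rewrite | github.com/Yumi-Namie/KC_POO-Python | POO - Connect_4_Game/list_utils.py | find_streak
-- ===== SOURCE A (Python) =====
-- def find_streak(list, element , ctde):
--     """
--     Devuleve True si en list hay ctde o más elementos SEGUIDOS
--     False en caso contrario y también si ctde <=0
--     """
--     if ctde > 0:
--         pass
--         # Inicializo el indice, el contador, y el indicador de racha
--         index = 0
--         count = 0
--         streak = False #indicador de la racha
--
--         # Mientreas no haya encontrado a ctde de elements seguidos
--         # y la lista no se haya terminado
--         while count < ctde and index < len(list):
--             if list[index] == element:
--                 # si lo encuentro, activo el indicador de rachas y incrememnto el contador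
--                 streak = True
--                 count = count +1
--             else:
--                 # si no lo encuentro, desactivo indicador de rachas y pongo contador a cero
--                 streak = False
--                 count = 0
--             # avanzo al siguiente elemento (incremento indice)
--             index = index +1
--         # devolvemos el resultado de comparar el contador con ctde
--         # SIEMPRE Y CUANDO ESTEMOS EN RACHA
--         if streak == True:
--             return count >= ctde
--         else:
--             return False
--     else:
--         return False
-- ===== SOURCE B (Python) =====
-- def find_streak(list, element, ctde):
--     if ctde <= 0:
--         return False
--     if ctde > len(list):
--         return False
--     pattern = [element] * ctde
--     return any(list[i:i+ctde] == pattern for i in range(len(list) - ctde + 1))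
-- ===== Notes on version B (the rewrite author's own statement) =====
-- stated objective: alternative
-- what changed: Replaces A's incremental counter/streak-flag state machine with a sliding-window contiguous-sublist comparison against a prebuilt pattern block.
import Mathlib
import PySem

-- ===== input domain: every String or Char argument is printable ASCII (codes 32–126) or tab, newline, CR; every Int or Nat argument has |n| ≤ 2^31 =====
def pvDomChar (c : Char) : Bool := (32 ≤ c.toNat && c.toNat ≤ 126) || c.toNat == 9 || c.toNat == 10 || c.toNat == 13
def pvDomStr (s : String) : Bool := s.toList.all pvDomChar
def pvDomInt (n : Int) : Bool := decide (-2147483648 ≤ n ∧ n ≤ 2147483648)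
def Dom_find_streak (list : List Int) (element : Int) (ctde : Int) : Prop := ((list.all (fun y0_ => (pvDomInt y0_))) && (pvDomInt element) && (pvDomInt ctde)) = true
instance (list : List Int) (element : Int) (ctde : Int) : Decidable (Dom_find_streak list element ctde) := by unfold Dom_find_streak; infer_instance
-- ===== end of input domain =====

-- B replaces A's counter/streak-flag state machine with a sliding-window sublist comparison (alternative decomposition, no speed claim).

-- ===== PORT A =====
-- the while loop of A: state (count, streak), scanning the list while count < ctde
def find_streak_loop (element ctde : Int) (l : List Int) (count : Int) (streak : Bool) : Int × Bool :=
  if count < ctde then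
    match l with
    | [] => (count, streak)
    | x :: xs =>
      if x = element then find_streak_loop element ctde xs (count + 1) true
      else find_streak_loop element ctde xs 0 false
  else (count, streak)

def find_streak (list : List Int) (element : Int) (ctde : Int) : Bool :=
  if ctde > 0 then
    let r := find_streak_loop element ctde list 0 false
    if r.2 = true then decide (r.1 ≥ ctde) else false
  else false

-- ===== PORT B =====
def find_streak_alt (list : List Int) (element : Int) (ctde : Int) : Bool :=
  if ctde ≤ 0 then false
  else if ctde > (list.length : Int) then false
  else
    let pattern := List.replicate ctde.toNat element
    (PySem.List.pyRange 0 ((list.length : Int) - ctde + 1) 1).any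
      (fun i => PySem.List.slice list (some i) (some (i + ctde)) == pattern)

-- ===== PRECONDITION & SPEC =====
def Spec_find_streak (list : List Int) (element : Int) (ctde : Int) (out : Bool) : Prop := out = find_streak_alt list element ctde
instance (list : List Int) (element : Int) (ctde : Int) (out : Bool) : Decidable (Spec_find_streak list element ctde out) := by unfold Spec_find_streak; infer_instance

-- ===== CLAIM (what is proved, stated in full; the proofs are below) =====
def Claim_equal_find_streak : Prop := ∀ (list : List Int) (element : Int) (ctde : Int), Dom_find_streak list element ctde → Spec_find_streak list element ctde (find_streak list element ctde)

-- ===== LEMMAS AND PROOFS =====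

-- both programs decide: some run of ctde consecutive elements equal to `element` exists
def HasRun (l : List Int) (e : Int) (n : Nat) : Prop :=
  ∃ j : Nat, (l.drop j).take n = List.replicate n e

lemma take_replicate_mono {l : List Int} {e : Int} {k m : Nat} (hkm : k ≤ m)
    (h : l.take m = List.replicate m e) : l.take k = List.replicate k e := by
  have : l.take k = (l.take m).take k := by
    rw [List.take_take, Nat.min_eq_left hkm]
  rw [this, h, List.take_replicate, Nat.min_eq_left hkm]

lemma loop_iff (e c : Int) (hc : 0 < c) :
    ∀ (l : List Int) (count : Nat) (streak : Bool), (count : Int) < c →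
    ((((find_streak_loop e c l count streak).2 = true) ∧ (find_streak_loop e c l count streak).1 ≥ c) ↔
    (l.take (c.toNat - count) = List.replicate (c.toNat - count) e ∨
      ∃ j : Nat, 1 ≤ j ∧ (l.drop j).take c.toNat = List.replicate c.toNat e)) := by
  intro l
  induction l with
  | nil =>
    intro count streak hcount
    rw [find_streak_loop]
    simp only [if_pos hcount]
    constructor
    · rintro ⟨_, hge⟩; omega
    · rintro (h | ⟨j, _, h⟩) <;> simp only [List.drop_nil, List.take_nil] at h
      · have := congrArg List.length h; simp at this; omega
      · have := congrArg List.length h; simp at this; omega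
  | cons x xs ih =>
    intro count streak hcount
    rw [find_streak_loop]
    simp only [if_pos hcount]
    have hn : c.toNat - count ≥ 1 := by omega
    by_cases hx : x = e
    · simp only [if_pos hx]
      subst hx
      by_cases hnext : (count : Int) + 1 < c
      · have h1 : ((count + 1 : Nat) : Int) < c := by push_cast; omega
        have := ih (count + 1) true h1
        push_cast at this
        rw [this]
        have htk : (x :: xs).take (c.toNat - count) = List.replicate (c.toNat - count) x ↔
            xs.take (c.toNat - (count + 1)) = List.replicate (c.toNat - (count + 1)) x := by
          obtain ⟨m, hm⟩ : ∃ m, c.toNat - count = m + 1 := ⟨c.toNat - count - 1, by omega⟩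
          have hm' : c.toNat - (count + 1) = m := by omega
          rw [hm, hm', List.take_succ_cons, List.replicate_succ, List.cons.injEq]
          simp
        have hdrop : (∃ j : Nat, 1 ≤ j ∧ ((x :: xs).drop j).take c.toNat = List.replicate c.toNat x) ↔
            (xs.take c.toNat = List.replicate c.toNat x ∨
              ∃ j : Nat, 1 ≤ j ∧ (xs.drop j).take c.toNat = List.replicate c.toNat x) := by
          constructor
          · rintro ⟨j, hj, h⟩
            obtain ⟨j', rfl⟩ : ∃ j', j = j' + 1 := ⟨j - 1, by omega⟩
            rw [List.drop_succ_cons] at h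
            rcases Nat.eq_zero_or_pos j' with rfl | hj'
            · exact Or.inl (by simpa using h)
            · exact Or.inr ⟨j', hj', h⟩
          · rintro (h | ⟨j, hj, h⟩)
            · exact ⟨1, le_refl _, by simpa using h⟩
            · exact ⟨j + 1, by omega, by rwa [List.drop_succ_cons]⟩
        rw [htk, hdrop]
        constructor
        · rintro (h | h)
          · exact Or.inl h
          · exact Or.inr (Or.inr h)
        · rintro (h | h | h)
          · exact Or.inl h
          · exact Or.inl (take_replicate_mono (by omega) h)
          · exact Or.inr h
      · -- count + 1 = c : loop stops with (count+1, true)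
        rw [find_streak_loop.eq_def]
        simp only [if_neg hnext]
        have h1 : c.toNat - count = 1 := by omega
        rw [h1]
        simp only [List.take_succ_cons, List.take_zero, List.replicate_one]
        constructor
        · intro _; exact Or.inl (by simp)
        · intro _; exact ⟨by simp, by omega⟩
    · simp only [if_neg hx]
      have h0 : ((0 : Nat) : Int) < c := by omega
      have := ih 0 false h0
      push_cast at this
      rw [this]
      simp only [Nat.sub_zero]
      have htk : ¬ ((x :: xs).take (c.toNat - count) = List.replicate (c.toNat - count) e) := by
        obtain ⟨m, hm⟩ : ∃ m, c.toNat - count = m + 1 := ⟨c.toNat - count - 1, by omega⟩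
        rw [hm, List.take_succ_cons, List.replicate_succ]
        intro h
        exact hx (List.cons.injEq .. ▸ h).1
      have hdrop : (∃ j : Nat, 1 ≤ j ∧ ((x :: xs).drop j).take c.toNat = List.replicate c.toNat e) ↔
          (xs.take c.toNat = List.replicate c.toNat e ∨
            ∃ j : Nat, 1 ≤ j ∧ (xs.drop j).take c.toNat = List.replicate c.toNat e) := by
        constructor
        · rintro ⟨j, hj, h⟩
          obtain ⟨j', rfl⟩ : ∃ j', j = j' + 1 := ⟨j - 1, by omega⟩
          rw [List.drop_succ_cons] at h
          rcases Nat.eq_zero_or_pos j' with rfl | hj'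
          · exact Or.inl (by simpa using h)
          · exact Or.inr ⟨j', hj', h⟩
        · rintro (h | ⟨j, hj, h⟩)
          · exact ⟨1, le_refl _, by simpa using h⟩
          · exact ⟨j + 1, by omega, by rwa [List.drop_succ_cons]⟩
      rw [hdrop]
      tauto

lemma find_streak_iff (l : List Int) (e c : Int) :
    find_streak l e c = true ↔ (0 < c ∧ HasRun l e c.toNat) := by
  by_cases hc : c > 0
  · have hdef : find_streak l e c =
        (if (find_streak_loop e c l 0 false).2 = true
         then decide ((find_streak_loop e c l 0 false).1 ≥ c) else false) := by
      simp only [find_streak, if_pos hc]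
    have h0 : ((0 : Nat) : Int) < c := by omega
    have hl := loop_iff e c hc l 0 false h0
    push_cast at hl
    simp only [Nat.sub_zero] at hl
    rw [hdef]
    constructor
    · intro h
      refine ⟨hc, ?_⟩
      by_cases hs : (find_streak_loop e c l 0 false).2 = true
      · rw [if_pos hs] at h
        have hge : (find_streak_loop e c l 0 false).1 ≥ c := of_decide_eq_true h
        rcases hl.mp ⟨hs, hge⟩ with h' | ⟨j, _, h'⟩
        · exact ⟨0, by simpa using h'⟩
        · exact ⟨j, h'⟩
      · rw [if_neg hs] at h
        exact absurd h (by simp)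
    · rintro ⟨_, j, hj⟩
      have hh : ((find_streak_loop e c l 0 false).2 = true) ∧ (find_streak_loop e c l 0 false).1 ≥ c := by
        apply hl.mpr
        rcases Nat.eq_zero_or_pos j with rfl | hjpos
        · exact Or.inl (by simpa using hj)
        · exact Or.inr ⟨j, hjpos, hj⟩
      rw [if_pos hh.1]
      exact decide_eq_true hh.2
  · simp only [find_streak, if_neg hc]
    constructor
    · intro h; cases h
    · rintro ⟨h, _⟩; omega

lemma find_streak_alt_iff (l : List Int) (e c : Int) :
    find_streak_alt l e c = true ↔ (0 < c ∧ HasRun l e c.toNat) := by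
  unfold find_streak_alt
  by_cases hc : c ≤ 0
  · simp only [if_pos hc]
    constructor
    · intro h; exact absurd h (by simp)
    · rintro ⟨h, _⟩; omega
  · simp only [if_neg hc]
    have hc' : 0 < c := by omega
    by_cases hlen : c > (l.length : Int)
    · simp only [if_pos hlen]
      constructor
      · intro h; exact absurd h (by simp)
      · rintro ⟨_, j, hj⟩
        exfalso
        have := congrArg List.length hj
        simp only [List.length_take, List.length_drop, List.length_replicate] at this
        omega
    · simp only [if_neg hlen]
      rw [List.any_eq_true]
      constructor
      · rintro ⟨i, hi, hp⟩
        rw [PySem.List.mem_pyRange_one] at hi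
        obtain ⟨hi0, hilt⟩ := hi
        refine ⟨hc', i.toNat, ?_⟩
        rw [beq_iff_eq] at hp
        rw [PySem.List.slice_toNat l hi0 (by omega)] at hp
        have : (i + c).toNat - i.toNat = c.toNat := by omega
        rwa [this] at hp
      · rintro ⟨_, j, hj⟩
        have hlen' : j + c.toNat ≤ l.length := by
          have := congrArg List.length hj
          simp only [List.length_take, List.length_drop, List.length_replicate] at this
          omega
        refine ⟨(j : Int), ?_, ?_⟩
        · rw [PySem.List.mem_pyRange_one]
          constructor
          · exact Int.natCast_nonneg j
          · omega
        · rw [beq_iff_eq, PySem.List.slice_toNat l (Int.natCast_nonneg j) (by omega)]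
          have h1 : ((j : Int) + c).toNat - ((j : Int)).toNat = c.toNat := by omega
          rw [h1]
          simpa using hj

-- ===== VERDICT (by name: the statement is the Claim_ definition above) =====
theorem find_streak_spec : Claim_equal_find_streak := by
  intro l e c _
  unfold Spec_find_streak
  rw [Bool.eq_iff_iff, find_streak_iff, find_streak_alt_iff]
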